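-- pv_equiv track=rewrite | github.com/SonntagNico/SignDAG- | prog/dag_implications.py | association_sign_from_paths
-- ===== SOURCE A (Python) =====
-- from typing import Dict, Iterable, List, Literal, Sequence, Set, Tuple
--
-- Edge = Tuple[str, str]
--
-- def is_collider(a: str, b: str, c: str, edge_set: Set[Edge]) -> bool:
--     return (a, b) in edge_set and (c, b) in edge_set
--
-- def count_negative_edges_on_path(path: Sequence[str], negative_edges: Set[Edge], edge_set: Set[Edge]) -> int:
--     count = 0
--     for i in range(len(path) - 1):
--         a, b = path[i], path[i + 1]
--         if (a, b) in edge_set: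
--             directed = (a, b)
--         elif (b, a) in edge_set:
--             directed = (b, a)
--         else:
--             raise ValueError(f"Path uses non-edge: {a}-{b}")
--         if directed in negative_edges:
--             count += 1
--     return count
--
-- def count_controlled_colliders_on_path(path: Sequence[str], z: Set[str], edge_set: Set[Edge]) -> int:
--     count = 0
--     for i in range(1, len(path) - 1):
--         a, b, c = path[i - 1], path[i], path[i + 1]
--         if is_collider(a, b, c, edge_set) and b in z:
--             count += 1
--     return count
--
-- def path_sign(path: Sequence[str], z: Set[str], edge_set: Set[Edge], negative_edges: Set[Edge]) -> Literal["positive", "negative"]: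
--     parity = (
--         count_negative_edges_on_path(path, negative_edges, edge_set)
--         + count_controlled_colliders_on_path(path, z, edge_set)
--     ) % 2
--     return "positive" if parity == 0 else "negative"
--
-- def association_sign_from_paths(paths: Sequence[Sequence[str]], z: Set[str], edge_set: Set[Edge], negative_edges: Set[Edge]) -> Literal["independent", "positive", "negative", "indeterminate"]:
--     if not paths:
--         return "independent"
--     signs = {path_sign(p, z, edge_set, negative_edges) for p in paths}
--     if signs == {"positive"}:
--         return "positive"
--     if signs == {"negative"}:
--         return "negative"
--     return "indeterminate"
-- ===== SOURCE B (Python) =====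
-- def association_sign_from_paths(paths, z, edge_set, negative_edges):
--     if not paths:
--         return "independent"
--     saw_positive = False
--     saw_negative = False
--     for path in paths:
--         parity = False
--         for i in range(len(path) - 1):
--             a, b = path[i], path[i + 1]
--             if (a, b) in edge_set:
--                 neg = (a, b) in negative_edges
--             elif (b, a) in edge_set:
--                 neg = (b, a) in negative_edges
--             else:
--                 raise ValueError(f"Path uses non-edge: {a}-{b}")
--             collider = (
--                 0 < i
--                 and (path[i - 1], a) in edge_set
--                 and (b, a) in edge_set
--                 and a in z
--             )
--             parity ^= neg != collider
--         if parity: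
--             saw_negative = True
--         else:
--             saw_positive = True
--     if saw_positive and saw_negative:
--         return "indeterminate"
--     return "negative" if saw_negative else "positive"
-- ===== Notes on version B (the rewrite author's own statement) =====
-- stated objective: simpler
-- what changed: One loop per path walks consecutive vertices once, XOR-accumulating a single parity bit that combines negative-edge and controlled-collider contributions (instead of two separate counting passes plus a mod-2 sum), and the aggregation keeps two booleans saw_positive/saw_negative instead of building a set of sign strings.
import Mathlib
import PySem

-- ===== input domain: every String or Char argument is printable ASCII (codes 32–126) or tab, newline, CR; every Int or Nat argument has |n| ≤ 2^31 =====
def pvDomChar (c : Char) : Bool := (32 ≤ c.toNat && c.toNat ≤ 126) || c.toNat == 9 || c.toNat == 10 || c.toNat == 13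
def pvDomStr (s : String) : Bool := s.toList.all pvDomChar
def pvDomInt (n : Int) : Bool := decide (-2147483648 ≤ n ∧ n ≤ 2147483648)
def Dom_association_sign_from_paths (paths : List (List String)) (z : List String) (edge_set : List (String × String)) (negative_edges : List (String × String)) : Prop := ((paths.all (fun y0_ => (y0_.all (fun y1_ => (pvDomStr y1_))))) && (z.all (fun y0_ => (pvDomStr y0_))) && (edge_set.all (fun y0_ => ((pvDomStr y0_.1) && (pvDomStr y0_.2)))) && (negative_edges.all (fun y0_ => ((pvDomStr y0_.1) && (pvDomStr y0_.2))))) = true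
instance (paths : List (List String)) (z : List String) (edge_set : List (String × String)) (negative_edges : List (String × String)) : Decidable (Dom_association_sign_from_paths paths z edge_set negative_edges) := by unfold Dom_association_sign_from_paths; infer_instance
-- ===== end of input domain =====

-- B replaces A's two counting passes per path by one loop that XOR-accumulates a parity bit,
-- and A's set of path signs by two booleans (objective: simpler).

-- ===== PORT A =====
def pvIsCollider (a b c : String) (edge_set : List (String × String)) : Bool :=
  edge_set.contains (a, b) && edge_set.contains (c, b)

def pvNegStep (negative_edges edge_set : List (String × String)) (path : List String)
    (acc : Option Int) (i : Int) : Option Int :=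
  match acc with
  | none => none
  | some count =>
    let a := PySem.List.pyGetD path i ""
    let b := PySem.List.pyGetD path (i + 1) ""
    if edge_set.contains (a, b) then
      if negative_edges.contains (a, b) then some (count + 1) else some count
    else if edge_set.contains (b, a) then
      if negative_edges.contains (b, a) then some (count + 1) else some count
    else none  -- Python raises ValueError here: modelled as none

def pvCountNeg (path : List String) (negative_edges edge_set : List (String × String)) : Option Int :=
  (PySem.List.pyRange 0 ((path.length : Int) - 1) 1).foldl (pvNegStep negative_edges edge_set path) (some 0)

def pvCollStep (z : List String) (edge_set : List (String × String)) (path : List String)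
    (count : Int) (i : Int) : Int :=
  let a := PySem.List.pyGetD path (i - 1) ""
  let b := PySem.List.pyGetD path i ""
  let c := PySem.List.pyGetD path (i + 1) ""
  if pvIsCollider a b c edge_set && z.contains b then count + 1 else count

def pvCountColl (path : List String) (z : List String) (edge_set : List (String × String)) : Int :=
  (PySem.List.pyRange 1 ((path.length : Int) - 1) 1).foldl (pvCollStep z edge_set path) 0

def pvPathSign (path : List String) (z : List String) (edge_set negative_edges : List (String × String)) : Option String :=
  match pvCountNeg path negative_edges edge_set with
  | none => none
  | some cn =>
    some (if PySem.Int.mod (cn + pvCountColl path z edge_set) 2 == 0 then "positive" else "negative")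

def pvSignStep (z : List String) (edge_set negative_edges : List (String × String))
    (acc : Option (PySem.Set String)) (p : List String) : Option (PySem.Set String) :=
  match acc, pvPathSign p z edge_set negative_edges with
  | some s, some v => some (PySem.Set.add s v)
  | _, _ => none

def association_sign_from_paths (paths : List (List String)) (z : List String) (edge_set : List (String × String)) (negative_edges : List (String × String)) : String :=
  if paths.isEmpty then "independent"
  else
    match paths.foldl (pvSignStep z edge_set negative_edges) (some (PySem.Set.empty : PySem.Set String)) with
    | none => ""  -- a path uses a non-edge: Python A raises ValueError (outside Pre_)
    | some signs =>
      if PySem.Set.equal signs (PySem.Set.ofList ["positive"]) then "positive"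
      else if PySem.Set.equal signs (PySem.Set.ofList ["negative"]) then "negative"
      else "indeterminate"

-- ===== PORT B =====
def pvParStep (z : List String) (edge_set negative_edges : List (String × String)) (path : List String)
    (acc : Option Bool) (i : Int) : Option Bool :=
  match acc with
  | none => none
  | some parity =>
    let a := PySem.List.pyGetD path i ""
    let b := PySem.List.pyGetD path (i + 1) ""
    let negOpt : Option Bool :=
      if edge_set.contains (a, b) then some (negative_edges.contains (a, b))
      else if edge_set.contains (b, a) then some (negative_edges.contains (b, a))
      else none  -- Python raises ValueError here: modelled as none
    match negOpt with
    | none => none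
    | some nb =>
      let collider := decide (0 < i) && edge_set.contains (PySem.List.pyGetD path (i - 1) "", a)
          && edge_set.contains (b, a) && z.contains a
      some (parity != (nb != collider))

def pvPathParity (path : List String) (z : List String) (edge_set negative_edges : List (String × String)) : Option Bool :=
  (PySem.List.pyRange 0 ((path.length : Int) - 1) 1).foldl (pvParStep z edge_set negative_edges path) (some false)

def pvFlagStep (z : List String) (edge_set negative_edges : List (String × String))
    (acc : Option (Bool × Bool)) (p : List String) : Option (Bool × Bool) :=
  match acc, pvPathParity p z edge_set negative_edges with
  | some (sp, sn), some par => some (sp || !par, sn || par)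
  | _, _ => none

def association_sign_from_paths_alt (paths : List (List String)) (z : List String) (edge_set : List (String × String)) (negative_edges : List (String × String)) : String :=
  if paths.isEmpty then "independent"
  else
    match paths.foldl (pvFlagStep z edge_set negative_edges) (some (false, false)) with
    | none => ""  -- ValueError propagates, as in A
    | some (sp, sn) =>
      if sp && sn then "indeterminate"
      else if sn then "negative" else "positive"

-- ===== PRECONDITION & SPEC =====
-- Pre_ excludes exactly the inputs on which the Python A raises ValueError: some path contains
-- a consecutive pair that is an edge in neither direction.
def Pre_association_sign_from_paths (paths : List (List String)) (z : List String) (edge_set : List (String × String)) (negative_edges : List (String × String)) : Prop :=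
  ∀ p ∈ paths, ∀ i < p.length - 1,
    (p.getD i "", p.getD (i + 1) "") ∈ edge_set ∨ (p.getD (i + 1) "", p.getD i "") ∈ edge_set
instance (paths : List (List String)) (z : List String) (edge_set : List (String × String)) (negative_edges : List (String × String)) : Decidable (Pre_association_sign_from_paths paths z edge_set negative_edges) := by unfold Pre_association_sign_from_paths; infer_instance

def pvWitness_association_sign_from_paths : List (List String) × List String × (List (String × String)) × (List (String × String)) :=
  ([["a", "b"], ["a", "c", "b"]], ["c"], [("a", "b"), ("a", "c"), ("b", "c")], [("a", "c")])

def Spec_association_sign_from_paths (paths : List (List String)) (z : List String) (edge_set : List (String × String)) (negative_edges : List (String × String)) (out : String) : Prop := out = association_sign_from_paths_alt paths z edge_set negative_edges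
instance (paths : List (List String)) (z : List String) (edge_set : List (String × String)) (negative_edges : List (String × String)) (out : String) : Decidable (Spec_association_sign_from_paths paths z edge_set negative_edges out) := by unfold Spec_association_sign_from_paths; infer_instance

-- ===== CLAIM (what is proved, stated in full; the proofs are below) =====
def Claim_equal_association_sign_from_paths : Prop := ∀ (paths : List (List String)) (z : List String) (edge_set : List (String × String)) (negative_edges : List (String × String)), Dom_association_sign_from_paths paths z edge_set negative_edges → Pre_association_sign_from_paths paths z edge_set negative_edges → Spec_association_sign_from_paths paths z edge_set negative_edges (association_sign_from_paths paths z edge_set negative_edges)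

-- ===== LEMMAS AND PROOFS =====

lemma pv_parity_arith (c cc : Int) (nb coll : Bool) :
    (decide (PySem.Int.mod (c + cc) 2 ≠ 0) != (nb != coll))
      = decide (PySem.Int.mod ((c + (if nb then 1 else 0)) + (cc + (if coll then 1 else 0))) 2 ≠ 0) := by
  rw [PySem.Int.mod_eq_emod_of_pos (by norm_num), PySem.Int.mod_eq_emod_of_pos (by norm_num)]
  cases nb <;> cases coll <;> rw [Bool.eq_iff_iff] <;> simp <;> omega

lemma pv_signStep_none (z : List String) (E neg : List (String × String)) (ps : List (List String)) :
    ps.foldl (pvSignStep z E neg) none = none := by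
  induction ps with
  | nil => rfl
  | cons p ps ih =>
    have h : pvSignStep z E neg none p = none := by
      unfold pvSignStep; cases pvPathSign p z E neg <;> rfl
    simp [List.foldl_cons, h, ih]

lemma pv_flagStep_none (z : List String) (E neg : List (String × String)) (ps : List (List String)) :
    ps.foldl (pvFlagStep z E neg) none = none := by
  induction ps with
  | nil => rfl
  | cons p ps ih =>
    have h : pvFlagStep z E neg none p = none := by
      unfold pvFlagStep; cases pvPathParity p z E neg <;> rfl
    simp [List.foldl_cons, h, ih]

-- per-path: B's single parity fold over the first k edges computes the parity of A's two counts
lemma pv_parity_cn (z : List String) (E neg : List (String × String)) (path : List String) (k : Nat) :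
    ((List.range k).map (fun j : Nat => (j : Int))).foldl (pvParStep z E neg path) (some false)
      = (((List.range k).map (fun j : Nat => (j : Int))).foldl (pvNegStep neg E path) (some 0)).map
          (fun c => decide (PySem.Int.mod
            (c + ((List.range (k - 1)).map (fun j : Nat => (1 : Int) + (j : Int))).foldl (pvCollStep z E path) 0) 2 ≠ 0)) := by
  induction k with
  | zero =>
    simp [PySem.Int.mod]
  | succ k ih =>
    rw [List.range_succ, List.map_append, List.foldl_append, List.foldl_append, ih]
    simp only [Nat.add_sub_cancel]
    have hcc : ((List.range k).map (fun j : Nat => (1 : Int) + (j : Int))).foldl (pvCollStep z E path) 0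
        = (((List.range (k - 1)).map (fun j : Nat => (1 : Int) + (j : Int))).foldl (pvCollStep z E path) 0)
          + (if (decide ((0 : Int) < (k : Int))
                && E.contains (PySem.List.pyGetD path ((k : Int) - 1) "", PySem.List.pyGetD path (k : Int) "")
                && E.contains (PySem.List.pyGetD path ((k : Int) + 1) "", PySem.List.pyGetD path (k : Int) "")
                && z.contains (PySem.List.pyGetD path (k : Int) "")) then 1 else 0) := by
      cases k with
      | zero => simp
      | succ m =>
        rw [List.range_succ, List.map_append, List.foldl_append]
        simp only [List.map_cons, List.map_nil, List.foldl_cons, List.foldl_nil, Nat.add_sub_cancel]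
        have hv : ((1 : Int) + ((m : Nat) : Int)) = (((m + 1) : Nat) : Int) := by push_cast; ring
        rw [hv]
        have hpos : (0 : Int) < (((m + 1) : Nat) : Int) := by positivity
        simp only [pvCollStep, pvIsCollider, hpos, decide_true, Bool.true_and]
        split_ifs <;> simp_all [Bool.and_assoc]
    cases hcn : ((List.range k).map (fun j : Nat => (j : Int))).foldl (pvNegStep neg E path) (some 0) with
    | none =>
      simp only [Option.map_none, List.map_cons, List.map_nil, List.foldl_cons, List.foldl_nil]
      unfold pvParStep pvNegStep
      simp
    | some c =>
      simp only [Option.map_some, List.map_cons, List.map_nil, List.foldl_cons, List.foldl_nil]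
      rw [hcc]
      simp only [pvParStep, pvNegStep]
      by_cases h1 : E.contains (PySem.List.pyGetD path (k : Int) "", PySem.List.pyGetD path ((k : Int) + 1) "") = true
      · simp only [h1, if_true]
        by_cases h2 : neg.contains (PySem.List.pyGetD path (k : Int) "", PySem.List.pyGetD path ((k : Int) + 1) "") = true
        · simp only [h2, if_true, Option.map_some, Option.some.injEq]
          rw [pv_parity_arith]
          norm_num
        · simp only [Bool.not_eq_true] at h2
          simp only [h2, Bool.false_eq_true, if_false, Option.map_some, Option.some.injEq]
          rw [pv_parity_arith]
          norm_num
      · simp only [Bool.not_eq_true] at h1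
        simp only [h1, Bool.false_eq_true, if_false]
        by_cases h3 : E.contains (PySem.List.pyGetD path ((k : Int) + 1) "", PySem.List.pyGetD path (k : Int) "") = true
        · simp only [h3, if_true]
          by_cases h4 : neg.contains (PySem.List.pyGetD path ((k : Int) + 1) "", PySem.List.pyGetD path (k : Int) "") = true
          · simp only [h4, if_true, Option.map_some, Option.some.injEq]
            rw [pv_parity_arith]
            norm_num
          · simp only [Bool.not_eq_true] at h4
            simp only [h4, Bool.false_eq_true, if_false, Option.map_some, Option.some.injEq]
            rw [pv_parity_arith]
            norm_num
        · simp only [Bool.not_eq_true] at h3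
          simp only [h3, Bool.false_eq_true, if_false]
          rfl

lemma pv_sign_ite (X : Int) :
    (if (PySem.Int.mod X 2 == 0) = true then "positive" else "negative")
      = (if (decide (PySem.Int.mod X 2 ≠ 0)) = true then "negative" else "positive") := by
  by_cases h : PySem.Int.mod X 2 = 0
  · rw [if_pos (by simpa using h), if_neg (by simpa using h)]
  · rw [if_neg (by simpa using h), if_pos (by simpa using h)]

lemma pv_pathSign_parity (path : List String) (z : List String) (E neg : List (String × String)) :
    pvPathSign path z E neg
      = (pvPathParity path z E neg).map (fun par => if par then "negative" else "positive") := by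
  unfold pvPathSign pvPathParity pvCountNeg pvCountColl
  rw [PySem.List.pyRange_one, PySem.List.pyRange_one]
  have hk : (((path.length : Int) - 1) - 1).toNat = ((path.length : Int) - 1).toNat - 1 := by omega
  simp only [sub_zero, zero_add, hk]
  rw [pv_parity_cn]
  cases hcn : ((List.range (((path.length : Int) - 1)).toNat).map (fun j : Nat => (j : Int))).foldl
      (pvNegStep neg E path) (some 0) with
  | none => simp
  | some c =>
    simp only [Option.map_some]
    exact congrArg some (pv_sign_ite _)

lemma pv_equal_singleton (s' : PySem.Set String) (v : String) :
    PySem.Set.equal s' (PySem.Set.ofList [v]) = true ↔ (∀ x ∈ s', x = v) ∧ v ∈ s' := by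
  rw [PySem.Set.equal_iff]
  constructor
  · intro h
    refine ⟨fun x hx => ?_, (h v).mpr (by simp [PySem.Set.mem_ofList])⟩
    have := (h x).mp hx
    simpa [PySem.Set.mem_ofList] using this
  · rintro ⟨h1, h2⟩ x
    constructor
    · intro hx; simp [PySem.Set.mem_ofList, h1 x hx]
    · intro hx
      simp only [PySem.Set.mem_ofList, List.mem_singleton] at hx
      subst hx; exact h2

lemma pv_decide (s' : PySem.Set String) (sp' sn' : Bool)
    (hmem : ∀ x ∈ s', x = "positive" ∨ x = "negative")
    (hsp : sp' = true ↔ "positive" ∈ s') (hsn : sn' = true ↔ "negative" ∈ s') (hne : s' ≠ []) :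
    (if PySem.Set.equal s' (PySem.Set.ofList ["positive"]) then "positive"
     else if PySem.Set.equal s' (PySem.Set.ofList ["negative"]) then "negative"
     else "indeterminate")
    = (if sp' && sn' then "indeterminate" else if sn' then "negative" else "positive") := by
  cases sp' with
  | true =>
    have hpos : "positive" ∈ s' := hsp.mp rfl
    cases sn' with
    | true =>
      have hneg : "negative" ∈ s' := hsn.mp rfl
      have h1 : ¬ (PySem.Set.equal s' (PySem.Set.ofList ["positive"]) = true) := by
        rw [pv_equal_singleton]
        rintro ⟨ha, -⟩
        have := ha "negative" hneg
        simp at this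
      have h2 : ¬ (PySem.Set.equal s' (PySem.Set.ofList ["negative"]) = true) := by
        rw [pv_equal_singleton]
        rintro ⟨ha, -⟩
        have := ha "positive" hpos
        simp at this
      rw [if_neg h1, if_neg h2]
      simp
    | false =>
      have hnoneg : "negative" ∉ s' := fun h => by have := hsn.mpr h; simp at this
      have h1 : PySem.Set.equal s' (PySem.Set.ofList ["positive"]) = true := by
        rw [pv_equal_singleton]
        exact ⟨fun x hx => (hmem x hx).resolve_right (fun he => hnoneg (he ▸ hx)), hpos⟩
      rw [if_pos h1]
      simp
  | false =>
    have hnopos : "positive" ∉ s' := fun h => by have := hsp.mpr h; simp at this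
    cases sn' with
    | true =>
      have hneg : "negative" ∈ s' := hsn.mp rfl
      have h1 : ¬ (PySem.Set.equal s' (PySem.Set.ofList ["positive"]) = true) := by
        rw [pv_equal_singleton]
        rintro ⟨-, hv⟩
        exact hnopos hv
      have h2 : PySem.Set.equal s' (PySem.Set.ofList ["negative"]) = true := by
        rw [pv_equal_singleton]
        exact ⟨fun x hx => (hmem x hx).resolve_left (fun he => hnopos (he ▸ hx)), hneg⟩
      rw [if_neg h1, if_pos h2]
      simp
    | false =>
      exfalso
      rcases List.exists_mem_of_ne_nil s' hne with ⟨x, hx⟩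
      rcases hmem x hx with h | h
      · exact hnopos (h ▸ hx)
      · have := hsn.mpr (h ▸ hx); simp at this

lemma pv_flag_rel (z : List String) (E neg : List (String × String)) (ps : List (List String)) :
    ∀ (s : PySem.Set String) (sp sn : Bool),
      (∀ x ∈ s, x = "positive" ∨ x = "negative") →
      (sp = true ↔ "positive" ∈ s) → (sn = true ↔ "negative" ∈ s) → s ≠ [] →
      (ps.foldl (pvSignStep z E neg) (some s) = none ∧ ps.foldl (pvFlagStep z E neg) (some (sp, sn)) = none)
      ∨ ∃ s' sp' sn', ps.foldl (pvSignStep z E neg) (some s) = some s'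
          ∧ ps.foldl (pvFlagStep z E neg) (some (sp, sn)) = some (sp', sn')
          ∧ (∀ x ∈ s', x = "positive" ∨ x = "negative")
          ∧ (sp' = true ↔ "positive" ∈ s') ∧ (sn' = true ↔ "negative" ∈ s') ∧ s' ≠ [] := by
  induction ps with
  | nil =>
    intro s sp sn h1 h2 h3 h4
    right; exact ⟨s, sp, sn, rfl, rfl, h1, h2, h3, h4⟩
  | cons p ps ih =>
    intro s sp sn h1 h2 h3 h4
    simp only [List.foldl_cons]
    cases hps : pvPathSign p z E neg with
    | none =>
      have hpp : pvPathParity p z E neg = none := by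
        have h := pv_pathSign_parity p z E neg
        rw [hps] at h
        cases hq : pvPathParity p z E neg
        · rfl
        · rw [hq] at h; simp at h
      have e1 : pvSignStep z E neg (some s) p = none := by simp [pvSignStep, hps]
      have e2 : pvFlagStep z E neg (some (sp, sn)) p = none := by simp [pvFlagStep, hpp]
      rw [e1, e2, pv_signStep_none, pv_flagStep_none]
      exact Or.inl ⟨rfl, rfl⟩
    | some v =>
      have hpar := pv_pathSign_parity p z E neg
      rw [hps] at hpar
      cases hq : pvPathParity p z E neg with
      | none => rw [hq] at hpar; simp at hpar
      | some par =>
        rw [hq] at hpar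
        simp only [Option.map_some, Option.some.injEq] at hpar
        have e1 : pvSignStep z E neg (some s) p = some (PySem.Set.add s v) := by
          simp [pvSignStep, hps]
        have e2 : pvFlagStep z E neg (some (sp, sn)) p = some (sp || !par, sn || par) := by
          simp [pvFlagStep, hq]
        rw [e1, e2]
        apply ih
        · intro x hx
          rcases (PySem.Set.mem_add s v x).mp hx with hx' | hx'
          · exact h1 x hx'
          · subst hx'; rw [hpar]; cases par <;> simp
        · cases par <;> simp [hpar, PySem.Set.mem_add, h2]
        · cases par <;> simp [hpar, PySem.Set.mem_add, h3]
        · unfold PySem.Set.add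
          split_ifs with hc
          · exact h4
          · simp

theorem association_sign_from_paths_spec : Claim_equal_association_sign_from_paths := by
  intro paths z E neg hdom hpre
  unfold Spec_association_sign_from_paths
  cases paths with
  | nil => rfl
  | cons p rest =>
    unfold association_sign_from_paths association_sign_from_paths_alt
    simp only [List.isEmpty_cons, Bool.false_eq_true, if_false, List.foldl_cons]
    cases hps : pvPathSign p z E neg with
    | none =>
      have hpp : pvPathParity p z E neg = none := by
        have h := pv_pathSign_parity p z E neg
        rw [hps] at h
        cases hq : pvPathParity p z E neg
        · rfl
        · rw [hq] at h; simp at h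
      have e1 : pvSignStep z E neg (some PySem.Set.empty) p = none := by simp [pvSignStep, hps]
      have e2 : pvFlagStep z E neg (some (false, false)) p = none := by simp [pvFlagStep, hpp]
      rw [e1, e2, pv_signStep_none, pv_flagStep_none]
    | some v =>
      have hpar := pv_pathSign_parity p z E neg
      rw [hps] at hpar
      cases hq : pvPathParity p z E neg with
      | none => rw [hq] at hpar; simp at hpar
      | some par =>
        rw [hq] at hpar
        simp only [Option.map_some, Option.some.injEq] at hpar
        have e1 : pvSignStep z E neg (some PySem.Set.empty) p = some (PySem.Set.add PySem.Set.empty v) := by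
          simp [pvSignStep, hps]
        have hadd : PySem.Set.add PySem.Set.empty v = [v] := by
          simp [PySem.Set.add, PySem.Set.empty]
        have e2 : pvFlagStep z E neg (some (false, false)) p = some (false || !par, false || par) := by
          simp [pvFlagStep, hq]
        rw [e1, hadd, e2]
        obtain ⟨ha, hb⟩ | ⟨s', sp', sn', hf1, hf2, hmem, hsp, hsn, hne⟩ :=
          pv_flag_rel z E neg rest [v] (false || !par) (false || par)
            (by intro x hx; simp only [List.mem_singleton] at hx; subst hx
                rw [hpar]; cases par <;> simp)
            (by cases par <;> simp [hpar])
            (by cases par <;> simp [hpar])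
            (by simp)
        · rw [ha, hb]
        · rw [hf1, hf2]
          exact pv_decide s' sp' sn' hmem hsp hsn hne
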